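-- pv_equiv track=rewrite | github.com/raphaelsenn/playervectors | src/ConditionFunc.py | get_abc
-- ===== SOURCE A (Python) =====
-- def get_abc(str_input:str, start:int = 0):
--     str_new = ""
--     index= start
--     break_var = False
--     while True:
--         if index>=len(str_input):
--             return None
--         if str_input[index].isalpha():
--             str_new+=str_input[index]
--             break_var =True
--         elif break_var:
--             break
--         index+=1
--     return str_new
-- ===== SOURCE B (Python) =====
-- def get_abc(str_input: str, start: int = 0):
--     n = len(str_input)
--     i = start
--     while i < n and not str_input[i].isalpha():
--         i += 1
--     j = i
--     while j < n and str_input[j].isalpha():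
--         j += 1
--     if i == j or j == n:
--         return None
--     return str_input[i:j]
-- ===== Notes on version B (the rewrite author's own statement) =====
-- stated objective: simpler
-- what changed: Replaces A's single while-True loop with a boolean state flag and character-by-character string accumulation by a two-phase index scan (skip non-alpha, then advance past the alpha run) followed by one slice; B builds no intermediate strings.
-- outside the precondition, e.g. on get_abc('ab cd', -2): A returns 'cdab', B returns ''
import Mathlib
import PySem

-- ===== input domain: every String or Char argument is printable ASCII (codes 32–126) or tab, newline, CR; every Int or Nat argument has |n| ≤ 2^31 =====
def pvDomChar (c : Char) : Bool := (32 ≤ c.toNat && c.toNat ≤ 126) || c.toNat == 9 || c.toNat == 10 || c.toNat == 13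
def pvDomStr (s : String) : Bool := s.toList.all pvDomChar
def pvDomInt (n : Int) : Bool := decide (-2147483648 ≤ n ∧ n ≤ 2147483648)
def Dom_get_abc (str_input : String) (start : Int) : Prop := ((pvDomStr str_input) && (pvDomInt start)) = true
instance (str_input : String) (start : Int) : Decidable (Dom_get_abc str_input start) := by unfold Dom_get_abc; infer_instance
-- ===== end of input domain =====

-- B replaces A's while-True loop with state flag and char-by-char accumulation by a
-- two-phase index scan plus one slice; objective: simpler (no speed claim).


-- ===== PORT A =====
-- A's `while True` loop: state is (str_new, index, break_var); the IndexError on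
-- index < -len is rendered as `none` (those inputs are outside Pre_get_abc).
def getAbcLoop (cs : List Char) (str_new : List Char) (index : Int) (break_var : Bool) :
    Option String :=
  if _h : ((cs.length : Int)) ≤ index then none
  else
    match PySem.List.pyGet? cs index with
    | none => none
    | some c =>
      if PySem.Chars.isalpha c then getAbcLoop cs (str_new ++ [c]) (index + 1) true
      else if break_var then some (String.ofList str_new)
      else getAbcLoop cs str_new (index + 1) break_var
termination_by ((cs.length : Int) - index).toNat
decreasing_by all_goals (simp at _h; omega)

def get_abc (str_input : String) (start : Int) : Option String :=
  getAbcLoop str_input.toList [] start false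

-- ===== PORT B =====
-- first loop of Source B: advance i past non-alphabetic characters
def skipLoop (cs : List Char) (i : Int) : Int :=
  if _h : i < (cs.length : Int) then
    match PySem.List.pyGet? cs i with
    | some c => if PySem.Chars.isalpha c then i else skipLoop cs (i + 1)
    | none => i
  else i
termination_by ((cs.length : Int) - i).toNat
decreasing_by omega

-- second loop of Source B: advance j past alphabetic characters
def runLoop (cs : List Char) (j : Int) : Int :=
  if _h : j < (cs.length : Int) then
    match PySem.List.pyGet? cs j with
    | some c => if PySem.Chars.isalpha c then runLoop cs (j + 1) else j
    | none => j
  else j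
termination_by ((cs.length : Int) - j).toNat
decreasing_by omega

def get_abc_alt (str_input : String) (start : Int) : Option String :=
  let cs := str_input.toList
  let i := skipLoop cs start
  let j := runLoop cs i
  if i = j ∨ j = (cs.length : Int) then none
  else some (String.ofList (PySem.List.slice cs (some i) (some j)))

-- ===== PRECONDITION & SPEC =====
-- Pre_ excludes negative start, an unspecified corner of this run-extraction helper:
-- there Python's negative indexing makes A read a wrapped and then re-scanned region
-- (and raise IndexError for start < -len), a value B need not match.
def Pre_get_abc (str_input : String) (start : Int) : Prop := 0 ≤ start
instance (str_input : String) (start : Int) : Decidable (Pre_get_abc str_input start) := by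
  unfold Pre_get_abc; infer_instance

def pvWitness_get_abc : String × Int := ("ab cd", 0)

def Spec_get_abc (str_input : String) (start : Int) (out : Option String) : Prop :=
  out = get_abc_alt str_input start
instance (str_input : String) (start : Int) (out : Option String) :
    Decidable (Spec_get_abc str_input start out) := by unfold Spec_get_abc; infer_instance

-- ===== CLAIM (what is proved, stated in full; the proofs are below) =====
def Claim_equal_get_abc : Prop := ∀ (str_input : String) (start : Int),
  Dom_get_abc str_input start → Pre_get_abc str_input start →
  Spec_get_abc str_input start (get_abc str_input start)

-- ===== LEMMAS AND PROOFS =====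

-- run-of-alpha endpoint computed by B's second loop
theorem runLoop_eq (cs : List Char) (n : Nat) :
    runLoop cs (n : Int) =
      ((n + ((cs.drop n).takeWhile PySem.Chars.isalpha).length : Nat) : Int) := by
  induction hfuel : cs.length - n generalizing n with
  | zero =>
    have hd : cs.drop n = [] := List.drop_eq_nil_of_le (by omega)
    rw [runLoop, dif_neg (by exact_mod_cast (by omega : ¬ n < cs.length))]
    simp only [hd, List.takeWhile_nil, List.length_nil, Nat.add_zero]
  | succ f ih =>
    have hn : n < cs.length := by omega
    have hd : cs.drop n = cs[n] :: cs.drop (n+1) := List.drop_eq_getElem_cons hn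
    rw [runLoop, dif_pos (by exact_mod_cast hn), PySem.List.pyGet?_natCast,
        List.getElem?_eq_getElem hn]
    by_cases ha : PySem.Chars.isalpha cs[n]
    · have hcast : (n : Int) + 1 = ((n+1 : Nat) : Int) := by push_cast; ring
      simp only [ha, if_true, hcast]
      rw [ih (n+1) (by omega), hd, List.takeWhile_cons]
      simp only [ha, if_true, List.length_cons]
      push_cast; ring
    · simp only [ha, Bool.false_eq_true, if_false]
      rw [hd, List.takeWhile_cons]
      simp only [ha, Bool.false_eq_true, if_false, List.length_nil, Nat.add_zero]

-- skip endpoint computed by B's first loop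
theorem skipLoop_eq (cs : List Char) (n : Nat) :
    skipLoop cs (n : Int) =
      ((n + ((cs.drop n).takeWhile (fun c => !PySem.Chars.isalpha c)).length : Nat) : Int) := by
  induction hfuel : cs.length - n generalizing n with
  | zero =>
    have hd : cs.drop n = [] := List.drop_eq_nil_of_le (by omega)
    rw [skipLoop, dif_neg (by exact_mod_cast (by omega : ¬ n < cs.length))]
    simp only [hd, List.takeWhile_nil, List.length_nil, Nat.add_zero]
  | succ f ih =>
    have hn : n < cs.length := by omega
    have hd : cs.drop n = cs[n] :: cs.drop (n+1) := List.drop_eq_getElem_cons hn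
    rw [skipLoop, dif_pos (by exact_mod_cast hn), PySem.List.pyGet?_natCast,
        List.getElem?_eq_getElem hn]
    by_cases ha : PySem.Chars.isalpha cs[n]
    · simp only [ha, if_true]
      rw [hd, List.takeWhile_cons]
      simp only [ha, Bool.not_true, Bool.false_eq_true, if_false, List.length_nil, Nat.add_zero]
    · have hcast : (n : Int) + 1 = ((n+1 : Nat) : Int) := by push_cast; ring
      simp only [ha, Bool.false_eq_true, if_false, hcast]
      rw [ih (n+1) (by omega), hd, List.takeWhile_cons]
      simp only [ha, Bool.not_false, if_true, List.length_cons]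
      push_cast; ring

-- A's loop once the flag is set: it collects the alpha run, returning none when the
-- run reaches the end of the string
theorem loopA_true (cs : List Char) (n : Nat) (s : List Char) (hn : n ≤ cs.length) :
    getAbcLoop cs s (n : Int) true =
      (if n + ((cs.drop n).takeWhile PySem.Chars.isalpha).length = cs.length then none
       else some (String.ofList (s ++ (cs.drop n).takeWhile PySem.Chars.isalpha))) := by
  induction hfuel : cs.length - n generalizing n s with
  | zero =>
    have hd : cs.drop n = [] := List.drop_eq_nil_of_le (by omega)
    rw [getAbcLoop, dif_pos (by exact_mod_cast (by omega : cs.length ≤ n))]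
    have hlen : n + ((cs.drop n).takeWhile PySem.Chars.isalpha).length = cs.length := by
      rw [hd]; simp; omega
    rw [if_pos hlen]
  | succ f ih =>
    have hn' : n < cs.length := by omega
    have hd : cs.drop n = cs[n] :: cs.drop (n+1) := List.drop_eq_getElem_cons hn'
    rw [getAbcLoop, dif_neg (by exact_mod_cast (by omega : ¬ cs.length ≤ n)),
        PySem.List.pyGet?_natCast, List.getElem?_eq_getElem hn']
    by_cases ha : PySem.Chars.isalpha cs[n]
    · have hcast : (n : Int) + 1 = ((n+1 : Nat) : Int) := by push_cast; ring
      simp only [ha, if_true, hcast]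
      rw [ih (n+1) (s ++ [cs[n]]) (by omega) (by omega), hd, List.takeWhile_cons]
      simp only [ha, if_true, List.length_cons]
      have hcond : n + 1 + ((cs.drop (n+1)).takeWhile PySem.Chars.isalpha).length = cs.length
          ↔ n + (((cs.drop (n+1)).takeWhile PySem.Chars.isalpha).length + 1) = cs.length := by
        omega
      by_cases hc : n + 1 + ((cs.drop (n+1)).takeWhile PySem.Chars.isalpha).length = cs.length
      · rw [if_pos hc, if_pos (hcond.mp hc)]
      · rw [if_neg hc, if_neg (fun h => hc (hcond.mpr h))]
        simp
    · simp only [ha, Bool.false_eq_true, if_false, if_true]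
      rw [hd, List.takeWhile_cons]
      simp only [ha, Bool.false_eq_true, if_false, List.length_nil, Nat.add_zero,
        List.append_nil]
      rw [if_neg (by omega)]

-- A's loop in its initial flag-false phase equals B's skip-run-slice recipe
theorem loopA_false (cs : List Char) (n : Nat) :
    getAbcLoop cs [] (n : Int) false =
      (let i := n + ((cs.drop n).takeWhile (fun c => !PySem.Chars.isalpha c)).length
       let r := (cs.drop i).takeWhile PySem.Chars.isalpha
       if r = [] ∨ i + r.length = cs.length then none
       else some (String.ofList r)) := by
  induction hfuel : cs.length - n generalizing n with
  | zero =>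
    have hd : cs.drop n = [] := List.drop_eq_nil_of_le (by omega)
    rw [getAbcLoop, dif_pos (by exact_mod_cast (by omega : cs.length ≤ n))]
    simp only [hd, List.takeWhile_nil, List.length_nil, Nat.add_zero]
    simp
  | succ f ih =>
    have hn' : n < cs.length := by omega
    have hd : cs.drop n = cs[n] :: cs.drop (n+1) := List.drop_eq_getElem_cons hn'
    rw [getAbcLoop, dif_neg (by exact_mod_cast (by omega : ¬ cs.length ≤ n)),
        PySem.List.pyGet?_natCast, List.getElem?_eq_getElem hn']
    by_cases ha : PySem.Chars.isalpha cs[n]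
    · have hcast : (n : Int) + 1 = ((n+1 : Nat) : Int) := by push_cast; ring
      simp only [ha, if_true, hcast, List.nil_append]
      rw [loopA_true cs (n+1) [cs[n]] (by omega)]
      have hskip : ((cs.drop n).takeWhile (fun c => !PySem.Chars.isalpha c)) = [] := by
        rw [hd, List.takeWhile_cons]; simp [ha]
      simp only [hskip, List.length_nil, Nat.add_zero]
      conv_rhs => rw [hd, List.takeWhile_cons]
      simp only [ha, if_true, List.length_cons, List.singleton_append]
      have hrun : (cs[n] :: (cs.drop (n+1)).takeWhile PySem.Chars.isalpha) ≠ [] := by simp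
      by_cases hc : n + 1 + ((cs.drop (n+1)).takeWhile PySem.Chars.isalpha).length = cs.length
      · rw [if_pos hc, if_pos (Or.inr (by omega))]
      · rw [if_neg hc, if_neg ?_]
        intro h
        rcases h with h | h
        · exact hrun h
        · exact hc (by omega)
    · have hcast : (n : Int) + 1 = ((n+1 : Nat) : Int) := by push_cast; ring
      simp only [ha, Bool.false_eq_true, if_false, hcast]
      rw [ih (n+1) (by omega)]
      have hskip : ((cs.drop n).takeWhile (fun c => !PySem.Chars.isalpha c))
          = cs[n] :: ((cs.drop (n+1)).takeWhile (fun c => !PySem.Chars.isalpha c)) := by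
        rw [hd, List.takeWhile_cons]; simp [ha]
      simp only [hskip, List.length_cons]
      have harith : n + (((cs.drop (n+1)).takeWhile (fun c => !PySem.Chars.isalpha c)).length + 1)
          = n + 1 + ((cs.drop (n+1)).takeWhile (fun c => !PySem.Chars.isalpha c)).length := by
        omega
      rw [harith]

-- ===== VERDICT (by name: the statement is the Claim_ definition above) =====
theorem get_abc_spec : Claim_equal_get_abc := by
  intro str_input start _hdom hpre
  unfold Spec_get_abc get_abc get_abc_alt
  set cs := str_input.toList with hcs
  obtain ⟨m, rfl⟩ : ∃ m : Nat, start = (m : Int) :=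
    ⟨start.toNat, (Int.toNat_of_nonneg hpre).symm⟩
  rw [loopA_false cs m]
  simp only []
  rw [skipLoop_eq cs m]
  set i := m + ((cs.drop m).takeWhile (fun c => !PySem.Chars.isalpha c)).length with hi
  rw [runLoop_eq cs i]
  set r := (cs.drop i).takeWhile PySem.Chars.isalpha with hr
  have hslice : PySem.List.slice cs (some ((i : Nat) : Int)) (some ((i + r.length : Nat) : Int))
      = r := by
    have h1 : ((i + r.length : Nat) : Int) = ((i : Nat) : Int) + ((r.length : Nat) : Int) := by
      push_cast; ring
    rw [h1, PySem.List.slice_natCast_add]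
    exact (List.prefix_iff_eq_take.mp (List.takeWhile_prefix _)).symm
  rw [hslice]
  have hij : (((i : Nat) : Int) = ((i + r.length : Nat) : Int)) ↔ r = [] := by
    constructor
    · intro h
      have h0 : r.length = 0 := by exact_mod_cast (by omega : ((r.length : Nat) : Int) = 0)
      exact List.eq_nil_of_length_eq_zero h0
    · intro h; simp [h]
  have hjn : (((i + r.length : Nat) : Int) = ((cs.length : Nat) : Int)) ↔
      i + r.length = cs.length := by exact_mod_cast Iff.rfl
  by_cases h1 : r = [] ∨ i + r.length = cs.length
  · rw [if_pos h1, if_pos ?_]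
    rcases h1 with h | h
    · exact Or.inl (hij.mpr h)
    · exact Or.inr (hjn.mpr h)
  · rw [if_neg h1, if_neg ?_]
    intro h
    rcases h with h | h
    · exact h1 (Or.inl (hij.mp h))
    · exact h1 (Or.inr (hjn.mp h))
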